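-- pv_equiv track=rewrite | github.com/OldCorpo/X-Girl_Trans | ICON/PNG/makegpc.py | MakeInterlaceTable
-- ===== SOURCE A (Python) =====
-- def MakeInterlaceTable(size, steps):
-- 	table = {}
-- 	for step in steps:
-- 		if step == 0: continue
-- 		result = [None] * size
-- 		start = 0
-- 		writeofs = 0
-- 		while start < step:
-- 			i = start
-- 			while i < size:
-- 				result[writeofs] = i
-- 				writeofs += 1
-- 				i += step
-- 			start += 1
-- 		table[step] = result
-- 	return table
-- ===== SOURCE B (Python) =====
-- def MakeInterlaceTable(size, steps):
-- 	table = {}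
-- 	for step in steps:
-- 		if step == 0: continue
-- 		table[step] = sorted(range(size), key=lambda i: i % step)
-- 	return table
-- ===== Notes on version B (the rewrite author's own statement) =====
-- stated objective: idiomatic
-- what changed: Replaces the hand-written two-level phase-gather while-loops writing into a preallocated [None]*size buffer with a single stable sorted(range(size), key=lambda i: i % step) per step.
-- outside the precondition, e.g. on MakeInterlaceTable(2, [-1]): A returns {-1: [None, None]}, B returns {-1: [0, 1]}
import Mathlib
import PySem

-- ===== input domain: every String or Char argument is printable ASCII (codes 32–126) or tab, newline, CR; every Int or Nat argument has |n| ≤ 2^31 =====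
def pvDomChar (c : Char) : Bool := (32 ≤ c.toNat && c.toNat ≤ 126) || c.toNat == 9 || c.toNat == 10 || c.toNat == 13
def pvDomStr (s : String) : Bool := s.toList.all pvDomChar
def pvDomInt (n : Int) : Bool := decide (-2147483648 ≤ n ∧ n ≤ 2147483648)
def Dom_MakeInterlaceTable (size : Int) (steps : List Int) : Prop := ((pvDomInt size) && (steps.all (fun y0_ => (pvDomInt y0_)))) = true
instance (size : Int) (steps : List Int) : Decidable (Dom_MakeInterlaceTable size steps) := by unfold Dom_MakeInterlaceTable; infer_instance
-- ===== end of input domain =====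

-- B replaces A's hand-written two-level phase-gather while-loops (writing into a
-- preallocated buffer) with one stable sort of range(size) by residue i % step per step
-- (idiomatic; not faster). Pre_ excludes tables with a negative step and positive size,
-- where A's stored row is [None]*size (not a list of ints).


-- ===== PORT A =====
-- inner 'while i < size: result[writeofs] = i; writeofs += 1; i += step'
-- (the '0 < step' conjunct only makes the recursion total; A reaches the loop
-- only with 0 ≤ start < step, i.e. 0 < step)
def pvInnerA (size step : Int) (i : Int) (wo : Nat) (res : List (Option Int)) :
    Nat × List (Option Int) :=
  if h : i < size ∧ 0 < step then
    pvInnerA size step (i + step) (wo + 1) (res.set wo (some i))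
  else (wo, res)
termination_by (size - i).toNat
decreasing_by omega

-- outer 'while start < step: …; start += 1'
def pvOuterA (size step : Int) (start : Int) (wo : Nat) (res : List (Option Int)) :
    List (Option Int) :=
  if h : start < step then
    let p := pvInnerA size step start wo res
    pvOuterA size step (start + 1) p.1 p.2
  else res
termination_by (step - start).toNat
decreasing_by omega

def MakeInterlaceTable (size : Int) (steps : List Int) : List (Int × List Int) :=
  (steps.foldl
    (fun table step =>
      if step == 0 then table
      else
        -- result = [None]*size; the two while loops; table[step] = result.
        -- Under Pre_ every slot holds an index; 'Option.getD 0' only extracts it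
        -- (the dict's value type is List Int).
        table.insert step
          ((pvOuterA size step 0 0 (List.replicate size.toNat (none : Option Int))).map
            (fun o => o.getD 0)))
    PySem.Dict.empty).items

-- ===== PORT B =====
def MakeInterlaceTable_alt (size : Int) (steps : List Int) : List (Int × List Int) :=
  (steps.foldl
    (fun table step =>
      if step == 0 then table
      else table.insert step
        (PySem.List.sorted (PySem.List.pyRange 0 size) (fun i => PySem.Int.mod i step)))
    PySem.Dict.empty).items

-- ===== PRECONDITION & SPEC =====
-- Pre_ excludes exactly the inputs where some step is negative while size > 0: there A's
-- degenerate outer loop leaves the row as [None]*size, which is not a value of List Int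
-- (B returns the residue-sorted indices instead).
def Pre_MakeInterlaceTable (size : Int) (steps : List Int) : Prop :=
  ∀ s ∈ steps, 0 ≤ s ∨ size ≤ 0
instance (size : Int) (steps : List Int) : Decidable (Pre_MakeInterlaceTable size steps) := by
  unfold Pre_MakeInterlaceTable; infer_instance

def pvWitness_MakeInterlaceTable : Int × List Int := (6, [1, 2, 3, 0])

def Spec_MakeInterlaceTable (size : Int) (steps : List Int) (out : List (Int × List Int)) : Prop := out = MakeInterlaceTable_alt size steps
instance (size : Int) (steps : List Int) (out : List (Int × List Int)) : Decidable (Spec_MakeInterlaceTable size steps out) := by unfold Spec_MakeInterlaceTable; infer_instance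

-- ===== CLAIM (what is proved, stated in full; the proofs are below) =====
def Claim_equal_MakeInterlaceTable : Prop := ∀ (size : Int) (steps : List Int), Dom_MakeInterlaceTable size steps → Pre_MakeInterlaceTable size steps → Spec_MakeInterlaceTable size steps (MakeInterlaceTable size steps)

-- ===== LEMMAS AND PROOFS =====
def pvProg (size step : Int) (i : Int) : List Int :=
  if h : i < size ∧ 0 < step then i :: pvProg size step (i + step) else []
termination_by (size - i).toNat
decreasing_by omega

theorem mem_pvProg (size step : Int) (hstep : 0 < step) (i j : Int) :
    j ∈ pvProg size step i ↔ i ≤ j ∧ j < size ∧ step ∣ (j - i) := by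
  fun_induction pvProg size step i with
  | case1 i h ih =>
    simp only [List.mem_cons, ih]
    constructor
    · rintro (rfl | ⟨h1, h2, m, hm⟩)
      · exact ⟨le_refl _, h.1, 0, by ring⟩
      · exact ⟨by omega, h2, ⟨m + 1, by linear_combination hm⟩⟩
    · rintro ⟨h1, h2, m, hm⟩
      rcases eq_or_lt_of_le h1 with rfl | hlt
      · left; rfl
      · right
        have hm1 : 1 ≤ m := by nlinarith
        exact ⟨by nlinarith, h2, ⟨m - 1, by linear_combination hm⟩⟩
  | case2 i h =>
    simp only [List.not_mem_nil, false_iff]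
    rintro ⟨h1, h2, m, hm⟩
    exact h ⟨by omega, hstep⟩

theorem pvProg_pairwise_lt (size step i : Int) :
    (pvProg size step i).Pairwise (· < ·) := by
  fun_induction pvProg size step i with
  | case1 i h ih =>
    refine List.Pairwise.cons (fun j hj => ?_) ih
    have := (mem_pvProg size step h.2 _ j).mp hj
    omega
  | case2 i h => exact List.Pairwise.nil

theorem pvProg_mod (size step : Int) (hstep : 0 < step) (i j : Int)
    (hj : j ∈ pvProg size step i) : j % step = i % step := by
  have h := (mem_pvProg size step hstep i j).mp hj
  obtain ⟨m, hm⟩ := h.2.2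
  exact Int.modEq_iff_dvd.mpr ⟨-m, by linear_combination -hm⟩
def pvGroups (size step : Int) (start : Int) : List Int :=
  if h : start < step then pvProg size step start ++ pvGroups size step (start + 1) else []
termination_by (step - start).toNat
decreasing_by omega

theorem mem_pvGroups (size step : Int) (hstep : 0 < step) (start : Int) (h0 : 0 ≤ start) (j : Int) :
    j ∈ pvGroups size step start ↔ 0 ≤ j ∧ j < size ∧ start ≤ j % step := by
  fun_induction pvGroups size step start with
  | case1 start h ih =>
    have h0' : 0 ≤ start := h0
    simp only [List.mem_append, mem_pvProg size step hstep, ih (by omega)]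
    have hmod : ∀ x : Int, (start ≤ x ∧ x < size ∧ step ∣ (x - start)) ↔
        (0 ≤ x ∧ x < size ∧ x % step = start) := by
      intro x
      constructor
      · rintro ⟨h1, h2, m, hm⟩
        refine ⟨by omega, h2, ?_⟩
        have : x ≡ start [ZMOD step] := Int.modEq_iff_dvd.mpr ⟨-m, by linear_combination -hm⟩
        rw [this]
        exact Int.emod_eq_of_lt h0' h
      · rintro ⟨h1, h2, h3⟩
        have hdiv := Int.emod_add_mul_ediv x step
        have hq : 0 ≤ x / step := Int.ediv_nonneg h1 (le_of_lt hstep)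
        refine ⟨by nlinarith, h2, ⟨x / step, by linear_combination h3 - hdiv⟩⟩
    constructor
    · rintro (ha | hb)
      · have := (hmod j).mp ha
        omega
      · omega
    · rintro ⟨h1, h2, h3⟩
      by_cases hc : j % step = start
      · exact Or.inl ((hmod j).mpr ⟨h1, h2, hc⟩)
      · exact Or.inr ⟨h1, h2, by omega⟩
  | case2 start h =>
    simp only [List.not_mem_nil, false_iff]
    intro hj
    have := Int.emod_lt_of_pos j hstep
    omega
def pvLex (key : Int → Int) (a b : Int) : Prop :=
  key a < key b ∨ (key a = key b ∧ a < b)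

theorem pvGroups_pairwise (size step : Int) (hstep : 0 < step) (start : Int) (h0 : 0 ≤ start) :
    (pvGroups size step start).Pairwise (pvLex (fun i => PySem.Int.mod i step)) := by
  fun_induction pvGroups size step start with
  | case1 start h ih =>
    rw [List.pairwise_append]
    refine ⟨?_, ih (by omega), ?_⟩
    · refine (pvProg_pairwise_lt size step start).imp_of_mem (fun ha hb hab => ?_)
      right
      refine ⟨?_, hab⟩
      simp only [PySem.Int.mod_eq_emod_of_pos hstep]
      rw [pvProg_mod size step hstep _ _ ha, pvProg_mod size step hstep _ _ hb]
    · intro a ha b hb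
      left
      simp only [PySem.Int.mod_eq_emod_of_pos hstep]
      have hma := pvProg_mod size step hstep _ _ ha
      have hmb := (mem_pvGroups size step hstep _ (by omega) b).mp hb
      have : start % step = start := Int.emod_eq_of_lt h0 h
      omega
  | case2 start h => exact List.Pairwise.nil

theorem pyRange_pairwise_lt (a b : Int) : (PySem.List.pyRange a b).Pairwise (· < ·) := by
  by_cases h : a < b
  · generalize hk : (b - a).toNat = k
    induction k generalizing a with
    | zero => omega
    | succ k ih =>
      rw [PySem.List.pyRange_one_cons h]
      by_cases h2 : a + 1 < b
      · exact List.Pairwise.cons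
          (fun j hj => by have := PySem.List.mem_pyRange_one.mp hj; omega)
          (ih (a + 1) h2 (by omega))
      · have : PySem.List.pyRange (a + 1) b = [] := by
          rw [List.eq_nil_iff_forall_not_mem]
          intro x hx
          have := PySem.List.mem_pyRange_one.mp hx
          omega
        rw [this]
        exact List.pairwise_singleton _ _
  · have : PySem.List.pyRange a b = [] := by
      rw [List.eq_nil_iff_forall_not_mem]
      intro x hx
      have := PySem.List.mem_pyRange_one.mp hx
      omega
    rw [this]
    exact List.Pairwise.nil

theorem pvGroups_perm (size step : Int) (hstep : 0 < step) :
    (pvGroups size step 0).Perm (PySem.List.pyRange 0 size) := by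
  rw [List.perm_ext_iff_of_nodup, ]
  · intro j
    rw [mem_pvGroups size step hstep 0 le_rfl, PySem.List.mem_pyRange_one]
    have := Int.emod_nonneg j (by omega : step ≠ 0)
    omega
  · exact (pvGroups_pairwise size step hstep 0 le_rfl).imp (fun {a b} hab => by
      rintro rfl
      rcases hab with h | ⟨_, h⟩ <;> exact absurd h (lt_irrefl _))
  · exact (pyRange_pairwise_lt 0 size).imp (fun {a b} hab => by omega)
theorem insertBy_pairwise (key : Int → Int) (x : Int) (acc : List Int)
    (hacc : acc.Pairwise (pvLex key)) (hlt : ∀ y ∈ acc, y < x) :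
    (PySem.List.insertBy (fun a b => decide (key a < key b)) x acc).Pairwise (pvLex key) := by
  induction acc with
  | nil => simp [PySem.List.insertBy]
  | cons y ys ih =>
    rw [List.pairwise_cons] at hacc
    simp only [PySem.List.insertBy]
    split_ifs with h
    · simp only [decide_eq_true_eq] at h
      refine List.Pairwise.cons (fun z hz => ?_) (List.pairwise_cons.mpr hacc)
      rcases List.mem_cons.mp hz with rfl | hz'
      · exact Or.inl h
      · have := hacc.1 z hz'
        rcases this with h2 | ⟨h2, _⟩ <;> exact Or.inl (by omega)
    · simp only [decide_eq_true_eq, not_lt] at h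
      refine List.Pairwise.cons (fun z hz => ?_) (ih hacc.2 (fun z hz => hlt z (List.mem_cons_of_mem _ hz)))
      rcases (PySem.List.mem_insertBy _ _ _ _).mp hz with rfl | hz'
      · rcases lt_or_eq_of_le h with h2 | h2
        · exact Or.inl h2
        · exact Or.inr ⟨h2, hlt y (List.mem_cons_self)⟩
      · exact hacc.1 z hz'

theorem sorted_pairwise_lex (xs : List Int) (key : Int → Int) (hxs : xs.Pairwise (· < ·)) :
    (PySem.List.sorted xs key).Pairwise (pvLex key) := by
  rw [PySem.List.sorted_eq_foldl_insertBy]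
  suffices h : ∀ acc : List Int, acc.Pairwise (pvLex key) → (∀ y ∈ acc, ∀ x ∈ xs, y < x) →
      (List.foldl (fun acc x => PySem.List.insertBy (fun a b => decide (key a < key b)) x acc) acc xs).Pairwise (pvLex key) by
    exact h [] List.Pairwise.nil (by simp)
  induction xs with
  | nil => intro acc h _; exact h
  | cons x xs ih =>
    intro acc hacc hfresh
    rw [List.pairwise_cons] at hxs
    simp only [List.foldl_cons]
    refine ih hxs.2 _ (insertBy_pairwise key x acc hacc (fun y hy => hfresh y hy x List.mem_cons_self)) ?_
    intro y hy z hz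
    rcases (PySem.List.mem_insertBy _ _ _ _).mp hy with rfl | hy'
    · exact hxs.1 z hz
    · exact hfresh y hy' z (List.mem_cons_of_mem _ hz)

theorem row_eq (size step : Int) (hstep : 0 < step) :
    PySem.List.sorted (PySem.List.pyRange 0 size) (fun i => PySem.Int.mod i step) =
      pvGroups size step 0 := by
  have hperm : (PySem.List.sorted (PySem.List.pyRange 0 size) (fun i => PySem.Int.mod i step)).Perm (pvGroups size step 0) :=
    (PySem.List.sorted_perm _ _ _).trans (pvGroups_perm size step hstep).symm
  refine List.eq_of_perm_of_sorted (le := pvLex (fun i => PySem.Int.mod i step)) ?_ ?_ ?_ hperm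
  · intro a b _ _ h1 h2
    exact absurd h2 (fun h2 => by rcases h1 with h | ⟨h, h'⟩ <;> rcases h2 with h2 | ⟨h2, h2'⟩ <;> omega)
  · exact sorted_pairwise_lex _ _ (pyRange_pairwise_lt 0 size)
  · exact pvGroups_pairwise size step hstep 0 le_rfl

theorem pvProg_cons (size step i : Int) (h : i < size ∧ 0 < step) :
    pvProg size step i = i :: pvProg size step (i + step) := by
  rw [pvProg]; simp [h]

theorem pvProg_nil (size step i : Int) (h : ¬ (i < size ∧ 0 < step)) :
    pvProg size step i = [] := by
  rw [pvProg]; simp [h]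

theorem pvInnerA_spec (size step : Int) (i : Int) (pre : List Int) (k : Nat)
    (hk : (pvProg size step i).length ≤ k) :
    pvInnerA size step i pre.length (pre.map some ++ List.replicate k none) =
      (pre.length + (pvProg size step i).length,
        (pre ++ pvProg size step i).map some ++
          List.replicate (k - (pvProg size step i).length) none) := by
  obtain ⟨n, hn⟩ : ∃ n, (size - i).toNat ≤ n := ⟨_, le_refl _⟩
  induction n generalizing i pre k with
  | zero =>
    have hg : ¬ (i < size ∧ 0 < step) := by omega
    rw [pvInnerA, dif_neg hg, pvProg_nil size step i hg]
    simp
  | succ n ih =>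
    by_cases hg : i < size ∧ 0 < step
    · rw [pvInnerA, dif_pos hg]
      rw [pvProg_cons size step i hg] at hk ⊢
      simp only [List.length_cons] at hk ⊢
      have hk1 : 1 ≤ k := by omega
      have hset : (pre.map some ++ List.replicate k none).set pre.length (some i) =
          (pre ++ [i]).map some ++ List.replicate (k - 1) none := by
        rw [List.set_append]
        have hnlt : ¬ (pre.length < (pre.map some).length) := by simp
        rw [if_neg hnlt]
        have hrep : List.replicate k (none : Option Int) = none :: List.replicate (k-1) none := by
          rw [← List.replicate_succ]
          congr 1
          omega
        simp [hrep]
      rw [hset]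
      have hpl : pre.length + 1 = (pre ++ [i]).length := by simp
      rw [hpl, ih (i + step) (pre ++ [i]) (k - 1) (by omega) (by omega)]
      refine Prod.ext ?_ ?_
      · simp only []
        simp
        omega
      · simp only []
        rw [List.append_assoc]
        simp only [List.singleton_append]
        have : k - 1 - (pvProg size step (i + step)).length = k - ((pvProg size step (i + step)).length + 1) := by omega
        rw [this]
    · rw [pvInnerA, dif_neg hg, pvProg_nil size step i hg]
      simp
theorem pvGroups_cons (size step start : Int) (h : start < step) :
    pvGroups size step start = pvProg size step start ++ pvGroups size step (start + 1) := by
  rw [pvGroups]; simp [h]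

theorem pvGroups_nil (size step start : Int) (h : ¬ start < step) :
    pvGroups size step start = [] := by
  rw [pvGroups]; simp [h]

theorem pvOuterA_spec (size step : Int) (start : Int) (pre : List Int) (k : Nat)
    (hk : (pvGroups size step start).length ≤ k) :
    pvOuterA size step start pre.length (pre.map some ++ List.replicate k none) =
      (pre ++ pvGroups size step start).map some ++
        List.replicate (k - (pvGroups size step start).length) none := by
  obtain ⟨n, hn⟩ : ∃ n, (step - start).toNat ≤ n := ⟨_, le_refl _⟩
  induction n generalizing start pre k with
  | zero =>
    have hg : ¬ start < step := by omega
    rw [pvOuterA, dif_neg hg, pvGroups_nil size step start hg]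
    simp
  | succ n ih =>
    by_cases hg : start < step
    · rw [pvOuterA, dif_pos hg]
      rw [pvGroups_cons size step start hg] at hk ⊢
      simp only [List.length_append] at hk ⊢
      have hkp : (pvProg size step start).length ≤ k := by omega
      simp only [pvInnerA_spec size step start pre k hkp]
      have h1 : pre.length + (pvProg size step start).length = (pre ++ pvProg size step start).length := by simp
      rw [h1, ih (start + 1) (pre ++ pvProg size step start) (k - (pvProg size step start).length)
        (by omega) (by omega)]
      rw [List.append_assoc]
      have : k - (pvProg size step start).length - (pvGroups size step (start + 1)).length =
          k - ((pvProg size step start).length + (pvGroups size step (start + 1)).length) := by omega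
      rw [this]
    · rw [pvOuterA, dif_neg hg, pvGroups_nil size step start hg]
      simp

theorem pvGroups_length (size step : Int) (hstep : 0 < step) :
    (pvGroups size step 0).length = size.toNat := by
  rw [(pvGroups_perm size step hstep).length_eq]
  by_cases h : size ≤ 0
  · have : PySem.List.pyRange 0 size = [] := by
      rw [List.eq_nil_iff_forall_not_mem]
      intro x hx
      have := PySem.List.mem_pyRange_one.mp hx
      omega
    rw [this]
    simp
    omega
  · obtain ⟨m, rfl⟩ : ∃ m : Nat, size = (m : Int) := ⟨size.toNat, by omega⟩
    rw [PySem.List.pyRange_zero_natCast]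
    simp

theorem rowA_eq (size step : Int) (hstep : 0 < step) :
    (pvOuterA size step 0 0 (List.replicate size.toNat (none : Option Int))).map
      (fun o => o.getD 0) = pvGroups size step 0 := by
  have h0 : (0 : Nat) = ([] : List Int).length := rfl
  have h1 : List.replicate size.toNat (none : Option Int) =
      ([] : List Int).map some ++ List.replicate size.toNat none := by simp
  rw [h0, h1, pvOuterA_spec size step 0 [] size.toNat (by rw [pvGroups_length size step hstep])]
  rw [pvGroups_length size step hstep]
  simp

-- A's row equals B's row, for every step admitted by Pre_ (0 < step, or empty/negative size).
theorem pvRow_eq (size step : Int) (hstep : step ≠ 0) (h : 0 ≤ step ∨ size ≤ 0) :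
    (pvOuterA size step 0 0 (List.replicate size.toNat (none : Option Int))).map
      (fun o => o.getD 0) =
    PySem.List.sorted (PySem.List.pyRange 0 size) (fun i => PySem.Int.mod i step) := by
  by_cases hpos : 0 < step
  · rw [rowA_eq size step hpos, row_eq size step hpos]
  · have hneg : step < 0 ∧ size ≤ 0 := by omega
    have ht : size.toNat = 0 := by omega
    have hr : PySem.List.pyRange 0 size = [] := by
      rw [List.eq_nil_iff_forall_not_mem]
      intro x hx
      have := PySem.List.mem_pyRange_one.mp hx
      omega
    rw [ht, hr, pvOuterA, dif_neg (by omega : ¬ (0:Int) < step)]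
    rfl

-- ===== VERDICT (by name: the statement is the Claim_ definition above) =====
theorem MakeInterlaceTable_spec : Claim_equal_MakeInterlaceTable := by
  intro size steps _ hpre
  unfold Spec_MakeInterlaceTable MakeInterlaceTable MakeInterlaceTable_alt
  congr 1
  apply PySem.List.foldl_congr_mem'
  intro step hstep table
  by_cases h0 : step == 0
  · simp [h0]
  · simp only [h0, Bool.false_eq_true, if_false]
    rw [pvRow_eq size step (by simpa using h0) (hpre step hstep)]
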